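-- pv_equiv track=rewrite | github.com/Leechanhee123/youtube-creator-tools | src/services/seo_analyzer.py | _analyze_length_distribution
-- ===== SOURCE A (Python) =====
-- from typing import List, Dict, Any, Optional, Tuple
--
-- def _analyze_length_distribution(lengths: List[int]) -> Dict[str, int]:
--     """길이 분포 분석"""
--     return {
--         'very_short': len([l for l in lengths if l < 30]),    # 매우 짧음
--         'short': len([l for l in lengths if 30 <= l < 50]),   # 짧음
--         'optimal': len([l for l in lengths if 50 <= l < 70]), # 최적
--         'long': len([l for l in lengths if 70 <= l < 100]),   # 김
--         'very_long': len([l for l in lengths if l >= 100])    # 매우 김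
--     }
-- ===== SOURCE B (Python) =====
-- def _analyze_length_distribution(lengths):
--     """Sort once, then find each bucket boundary by binary search; counts are index differences."""
--     s = sorted(lengths)
--
--     def lower_bound(x):
--         # first index whose element is >= x in the sorted list s
--         lo, hi = 0, len(s)
--         while lo < hi:
--             mid = (lo + hi) // 2
--             if s[mid] < x:
--                 lo = mid + 1
--             else:
--                 hi = mid
--         return lo
--
--     i30 = lower_bound(30)
--     i50 = lower_bound(50)
--     i70 = lower_bound(70)
--     i100 = lower_bound(100)
--     return {
--         'very_short': i30,
--         'short': i50 - i30,
--         'optimal': i70 - i50,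
--         'long': i100 - i70,
--         'very_long': len(s) - i100,
--     }
-- ===== Notes on version B (the rewrite author's own statement) =====
-- stated objective: alternative
-- what changed: Instead of five filtering scans over the list, B sorts it once and locates the four bucket boundaries by hand-written binary search (lower_bound); each bucket count is a difference of boundary indices.
import Mathlib
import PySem

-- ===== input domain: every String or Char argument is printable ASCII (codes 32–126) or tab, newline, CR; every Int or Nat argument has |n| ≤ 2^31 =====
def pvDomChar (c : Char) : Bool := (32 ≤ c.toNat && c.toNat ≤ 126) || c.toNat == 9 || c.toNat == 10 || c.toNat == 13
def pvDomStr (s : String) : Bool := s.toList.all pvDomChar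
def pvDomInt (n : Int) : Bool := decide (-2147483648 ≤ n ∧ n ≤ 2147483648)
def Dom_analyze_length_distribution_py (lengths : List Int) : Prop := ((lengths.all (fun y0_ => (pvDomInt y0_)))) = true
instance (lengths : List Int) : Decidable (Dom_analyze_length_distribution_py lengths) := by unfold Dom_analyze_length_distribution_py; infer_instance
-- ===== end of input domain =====

-- B replaces A's five filtering scans by sort-once + binary search for the four boundaries (alternative algorithm).
-- ===== PORT A =====
def analyze_length_distribution_py (lengths : List Int) : List (String × Int) :=
  [("very_short", ((lengths.filter (fun l => decide (l < 30))).length : Int)),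
   ("short", ((lengths.filter (fun l => decide (30 ≤ l ∧ l < 50))).length : Int)),
   ("optimal", ((lengths.filter (fun l => decide (50 ≤ l ∧ l < 70))).length : Int)),
   ("long", ((lengths.filter (fun l => decide (70 ≤ l ∧ l < 100))).length : Int)),
   ("very_long", ((lengths.filter (fun l => decide (100 ≤ l))).length : Int))]

-- ===== PORT B =====
-- hand-written binary search of Source B, step for step; s[mid] is always in range (lo < hi ≤ len),
-- so the indexing is ported as getD with an unused default
def lowerBound (s : List Int) (x : Int) (lo hi : Nat) : Nat :=
  if _h : lo < hi then
    let mid := (lo + hi) / 2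
    if s.getD mid 0 < x then lowerBound s x (mid + 1) hi
    else lowerBound s x lo mid
  else lo
termination_by hi - lo
decreasing_by all_goals omega

def analyze_length_distribution_py_alt (lengths : List Int) : List (String × Int) :=
  let s := PySem.List.sorted lengths (fun x => x) false
  let i30 := lowerBound s 30 0 s.length
  let i50 := lowerBound s 50 0 s.length
  let i70 := lowerBound s 70 0 s.length
  let i100 := lowerBound s 100 0 s.length
  [("very_short", (i30 : Int)),
   ("short", (i50 : Int) - (i30 : Int)),
   ("optimal", (i70 : Int) - (i50 : Int)),
   ("long", (i100 : Int) - (i70 : Int)),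
   ("very_long", (s.length : Int) - (i100 : Int))]

-- ===== PRECONDITION & SPEC =====
def Spec_analyze_length_distribution_py (lengths : List Int) (out : List (String × Int)) : Prop := out = analyze_length_distribution_py_alt lengths
instance (lengths : List Int) (out : List (String × Int)) : Decidable (Spec_analyze_length_distribution_py lengths out) := by unfold Spec_analyze_length_distribution_py; infer_instance

-- ===== CLAIM =====
def Claim_equal_analyze_length_distribution_py : Prop := ∀ (lengths : List Int), Dom_analyze_length_distribution_py lengths → Spec_analyze_length_distribution_py lengths (analyze_length_distribution_py lengths)

-- ===== LEMMAS AND PROOFS =====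
-- invariant of the binary search: on a sorted list, the result r satisfies s[i] < x ↔ i < r
lemma lb_inv (s : List Int) (x : Int) (hs : s.Pairwise (· ≤ ·)) :
    ∀ n lo hi, hi - lo ≤ n → hi ≤ s.length → lo ≤ hi →
    (∀ i, i < lo → (h : i < s.length) → s[i] < x) →
    (∀ i, hi ≤ i → (h : i < s.length) → ¬ s[i] < x) →
    lowerBound s x lo hi ≤ s.length ∧
      ∀ i, (h : i < s.length) → (s[i] < x ↔ i < lowerBound s x lo hi) := by
  intro n
  induction n with
  | zero =>
    intro lo hi hn hhi hlh hlo hup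
    have : lo = hi := by omega
    subst this
    unfold lowerBound
    simp only [lt_irrefl, dite_false]
    refine ⟨by omega, fun i h => ⟨fun hx => ?_, fun hi' => hlo i hi' h⟩⟩
    by_contra hge
    exact hup i (by omega) h hx
  | succ n ih =>
    intro lo hi hn hhi hlh hlo hup
    rw [lowerBound]
    by_cases hcase : lo < hi
    · simp only [hcase, dite_true]
      have hmid : (lo + hi) / 2 < s.length := by omega
      have hget : s.getD ((lo + hi) / 2) 0 = s[(lo + hi) / 2] := List.getD_eq_getElem s 0 hmid
      rw [hget]
      have hpw := List.pairwise_iff_getElem.mp hs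
      by_cases hx : s[(lo + hi) / 2] < x
      · simp only [hx, if_true]
        apply ih ((lo + hi) / 2 + 1) hi (by omega) hhi (by omega)
        · intro i hi' h
          rcases Nat.lt_or_ge i ((lo + hi) / 2) with hlt | hge
          · exact lt_of_le_of_lt (hpw i ((lo + hi) / 2) h hmid hlt) hx
          · have : i = (lo + hi) / 2 := by omega
            subst this; exact hx
        · exact hup
      · simp only [hx, if_false]
        apply ih lo ((lo + hi) / 2) (by omega) (by omega) (by omega)
        · exact hlo
        · intro i hi' h
          rcases Nat.lt_or_ge ((lo + hi) / 2) i with hlt | hge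
          · intro hcon
            exact hx (lt_of_le_of_lt (hpw ((lo + hi) / 2) i hmid h hlt) hcon)
          · have : i = (lo + hi) / 2 := by omega
            subst this; exact hx
    · simp only [hcase, dite_false]
      have : lo = hi := by omega
      subst this
      refine ⟨by omega, fun i h => ⟨fun hx => ?_, fun hi' => hlo i hi' h⟩⟩
      by_contra hge
      exact hup i (by omega) h hx

-- a list whose elements < x are exactly the first r positions has filter-length r
lemma filter_len_of_iff (s : List Int) (x : Int) :
    ∀ r, r ≤ s.length → (∀ i, (h : i < s.length) → (s[i] < x ↔ i < r)) →
    (s.filter (fun l => decide (l < x))).length = r := by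
  induction s with
  | nil =>
    intro r hr _
    have : r = 0 := by simpa using hr
    subst this; simp
  | cons a t iht =>
    intro r hr h
    cases r with
    | zero =>
      have h0 := h 0 (by simp)
      have ha : ¬ a < x := fun hcon => absurd (h0.mp hcon) (by omega)
      have ht : (t.filter (fun l => decide (l < x))).length = 0 := by
        apply iht 0 (by omega)
        intro i hi'
        have := h (i + 1) (by simp; omega)
        simpa using this
      simp [ha, ht]
    | succ r' =>
      have h0 := h 0 (by simp)
      have ha : a < x := h0.mpr (Nat.succ_pos r')
      have ht : (t.filter (fun l => decide (l < x))).length = r' := by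
        apply iht r' (by simp at hr; omega)
        intro i hi'
        have := h (i + 1) (by simp; omega)
        simpa [Nat.succ_lt_succ_iff] using this
      simp [ha, ht]

lemma lb_count (s : List Int) (x : Int) (hs : s.Pairwise (· ≤ ·)) :
    lowerBound s x 0 s.length = (s.filter (fun l => decide (l < x))).length := by
  obtain ⟨hle, hiff⟩ := lb_inv s x hs s.length 0 s.length (by omega) (by omega) (by omega)
    (by intro i hi; omega) (by intro i hi h; omega)
  exact (filter_len_of_iff s x _ hle hiff).symm

-- counts of l < b split at a ≤ b into l < a and a ≤ l < b
lemma count_split (t : List Int) (a b : Int) (hab : a ≤ b) :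
    (t.filter (fun l => decide (l < b))).length =
      (t.filter (fun l => decide (l < a))).length +
      (t.filter (fun l => decide (a ≤ l ∧ l < b))).length := by
  induction t with
  | nil => simp
  | cons y t ih =>
    simp only [List.filter_cons]
    by_cases h1 : y < a
    · simp [h1, show y < b from by omega, show ¬ a ≤ y from by omega, ih]; omega
    · by_cases h2 : y < b
      · simp [h1, h2, show a ≤ y from by omega, ih]; omega
      · simp [h1, h2, show a ≤ y from by omega, ih]

-- elements < b and elements ≥ b partition the list
lemma count_compl (t : List Int) (b : Int) :
    (t.filter (fun l => decide (l < b))).length +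
      (t.filter (fun l => decide (b ≤ l))).length = t.length := by
  induction t with
  | nil => simp
  | cons y t ih =>
    simp only [List.filter_cons]
    by_cases h : y < b
    · simp [h, show ¬ b ≤ y from by omega]; omega
    · simp [h, show b ≤ y from by omega]; omega

-- filter lengths are invariant under permutation
lemma filter_len_perm {s t : List Int} (h : s.Perm t) (p : Int → Bool) :
    (s.filter p).length = (t.filter p).length := by
  rw [← List.countP_eq_length_filter, ← List.countP_eq_length_filter]
  exact h.countP_eq p

-- ===== VERDICT =====
theorem analyze_length_distribution_py_spec : Claim_equal_analyze_length_distribution_py := by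
  intro lengths _
  unfold Spec_analyze_length_distribution_py analyze_length_distribution_py
    analyze_length_distribution_py_alt
  set s := PySem.List.sorted lengths (fun x => x) false with hsdef
  have hperm : s.Perm lengths := PySem.List.sorted_perm lengths (fun x => x) false
  have hs : s.Pairwise (· ≤ ·) := by
    have := PySem.List.sorted_pairwise lengths (fun x => x)
    simpa using this
  have c30 := lb_count s 30 hs
  have c50 := lb_count s 50 hs
  have c70 := lb_count s 70 hs
  have c100 := lb_count s 100 hs
  have p30 := filter_len_perm hperm (fun l => decide (l < 30))
  have p50 := filter_len_perm hperm (fun l => decide (l < 50))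
  have p70 := filter_len_perm hperm (fun l => decide (l < 70))
  have p100 := filter_len_perm hperm (fun l => decide (l < 100))
  have s50 := count_split lengths 30 50 (by omega)
  have s70 := count_split lengths 50 70 (by omega)
  have s100 := count_split lengths 70 100 (by omega)
  have scmp := count_compl lengths 100
  have hlen : s.length = lengths.length := hperm.length_eq
  simp only [c30, c50, c70, c100]
  simp only [p30, p50, p70, p100, hlen, List.cons.injEq, Prod.mk.injEq, true_and, and_true]
  omega
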